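-- pv_equiv track=rewrite | github.com/turbosree/Cypher-Analytics | WeakPRG/FindMagicNumbers.py | check_repeating
-- ===== SOURCE A (Python) =====
-- def check_repeating(numbers, num_bytes):
--     repeating_numbers = {}
--     for idx, num in enumerate(numbers):
--         last_bytes = num[-2*num_bytes:]  # Since each byte is represented by 2 hexadecimal characters
--         if last_bytes in repeating_numbers:
--             repeating_numbers[last_bytes].append(idx)
--         else:
--             repeating_numbers[last_bytes] = [idx]
--     return repeating_numbers
-- ===== SOURCE B (Python) =====
-- def check_repeating(numbers, num_bytes):
--     keys = [num[-2*num_bytes:] for num in numbers]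
--     return {k: [i for i, k2 in enumerate(keys) if k2 == k] for k in keys}
-- ===== Notes on version B (the rewrite author's own statement) =====
-- stated objective: simpler
-- what changed: Replaces the incremental dict-accumulation loop (contains-check, append-or-insert) with a two-line declarative form: precompute the key list, then build the whole group for each key at once in a dict comprehension (duplicate keys overwrite with the identical value, keeping first-occurrence order).
import Mathlib
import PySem

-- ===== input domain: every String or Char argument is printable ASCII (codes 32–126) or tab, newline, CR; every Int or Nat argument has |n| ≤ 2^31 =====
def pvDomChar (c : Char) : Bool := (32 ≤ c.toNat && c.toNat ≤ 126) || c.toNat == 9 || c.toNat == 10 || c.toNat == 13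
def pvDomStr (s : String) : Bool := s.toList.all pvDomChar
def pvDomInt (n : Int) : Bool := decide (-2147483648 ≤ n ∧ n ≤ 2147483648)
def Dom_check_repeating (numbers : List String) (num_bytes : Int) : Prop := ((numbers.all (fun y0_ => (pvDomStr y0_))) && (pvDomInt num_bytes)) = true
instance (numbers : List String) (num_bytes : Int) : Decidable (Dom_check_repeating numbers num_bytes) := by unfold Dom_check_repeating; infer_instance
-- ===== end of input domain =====

-- B replaces A's incremental dict-accumulation loop with a declarative two-liner:
-- precompute the key list, then a dict comprehension builds each key's whole index
-- group at once (duplicates overwrite with the same value, keeping first-occurrence order).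


-- ===== PORT A =====
-- literal port of A: a dict accumulated over enumerate(numbers); `d[lb].append(idx)` on a
-- present key is Dict.modify lb [] (· ++ [idx]) (exact: modify rewrites the stored list in place)
def check_repeating (numbers : List String) (num_bytes : Int) : List (String × List Int) :=
  ((PySem.List.enumerate numbers 0).foldl
    (fun d p =>
      let lb := PySem.Str.slice p.2 (some ((-2) * num_bytes)) none
      if d.contains lb then d.modify lb [] (fun v => v ++ [p.1])
      else d.insert lb [p.1])
    PySem.Dict.empty).items

-- ===== PORT B =====
-- literal port of B: the key list, then the dict comprehension as a fold of overwriting inserts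
def check_repeating_alt (numbers : List String) (num_bytes : Int) : List (String × List Int) :=
  let keys := numbers.map (fun num => PySem.Str.slice num (some ((-2) * num_bytes)) none)
  (keys.foldl
    (fun d k =>
      d.insert k (((PySem.List.enumerate keys 0).filter (fun p => p.2 == k)).map (fun p => p.1)))
    PySem.Dict.empty).items

-- ===== PRECONDITION & SPEC =====
def Spec_check_repeating (numbers : List String) (num_bytes : Int) (out : List (String × List Int)) : Prop := out = check_repeating_alt numbers num_bytes
instance (numbers : List String) (num_bytes : Int) (out : List (String × List Int)) : Decidable (Spec_check_repeating numbers num_bytes out) := by unfold Spec_check_repeating; infer_instance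

-- ===== CLAIM (what is proved, stated in full; the proofs are below) =====
def Claim_equal_check_repeating : Prop := ∀ (numbers : List String) (num_bytes : Int), Dom_check_repeating numbers num_bytes → Spec_check_repeating numbers num_bytes (check_repeating numbers num_bytes)

-- ===== LEMMAS AND PROOFS =====

-- a fold of inserts whose value depends only on the key: last write wins
lemma get?_foldl_insert_const (v : String → List Int) (l : List String)
    (d : PySem.Dict String (List Int)) (k : String) :
    (l.foldl (fun d x => d.insert x (v x)) d).get? k
      = if k ∈ l then some (v k) else d.get? k := by
  induction l generalizing d with
  | nil => simp
  | cons x t ih =>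
      simp only [List.foldl_cons, ih, PySem.Dict.get?_insert, List.mem_cons]
      by_cases ht : k ∈ t <;> by_cases hx : k = x <;> simp [ht, hx]

-- the per-key index lists of the two programs coincide
lemma idx_lists_eq (kf : String → String) (k : String) (ns : List String) (s : Int) :
    ((((PySem.List.enumerate ns s).map (fun p => (kf p.2, p.1))).filter
        (fun q => q.1 == k)).map (fun q => q.2))
      = (((PySem.List.enumerate (ns.map kf) s).filter (fun p => p.2 == k)).map (fun p => p.1)) := by
  induction ns generalizing s with
  | nil => simp [PySem.List.enumerate_nil]
  | cons n t ih =>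
      simp only [List.map_cons, PySem.List.enumerate_cons, List.filter_cons]
      by_cases h : kf n = k <;> simp [h, ih (s + 1)]

-- the core equivalence, for an arbitrary key function
lemma items_eq (kf : String → String) (ns : List String) :
    ((PySem.List.enumerate ns 0).foldl
        (fun d p =>
          if d.contains (kf p.2) then d.modify (kf p.2) [] (fun v => v ++ [p.1])
          else d.insert (kf p.2) [p.1])
        PySem.Dict.empty).items
      = ((ns.map kf).foldl
          (fun d k =>
            d.insert k (((PySem.List.enumerate (ns.map kf) 0).filter (fun p => p.2 == k)).map (fun p => p.1)))
          PySem.Dict.empty).items := by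
  -- A's branch is an unconditional modify
  have h1 : ((PySem.List.enumerate ns 0).foldl
        (fun d p =>
          if d.contains (kf p.2) then d.modify (kf p.2) [] (fun v => v ++ [p.1])
          else d.insert (kf p.2) [p.1])
        PySem.Dict.empty)
      = ((PySem.List.enumerate ns 0).foldl
          (fun d p => d.modify (kf p.2) [] (fun v => v ++ [p.1])) PySem.Dict.empty) := by
    apply PySem.List.foldl_congr_mem
    intro acc x _
    by_cases h : acc.contains (kf x.2)
    · simp [h]
    · simp only [Bool.not_eq_true] at h
      simp [h, PySem.Dict.modify, PySem.Dict.getD_of_not_contains acc [] h]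
  rw [h1]
  set dA := (PySem.List.enumerate ns 0).foldl
      (fun d p => d.modify (kf p.2) [] (fun v => v ++ [p.1])) PySem.Dict.empty with hdA
  set vB := fun k => (((PySem.List.enumerate (ns.map kf) 0).filter (fun p => p.2 == k)).map
      (fun p => p.1)) with hvB
  set dB := (ns.map kf).foldl (fun d k => d.insert k (vB k)) PySem.Dict.empty with hdB
  have hmap : (PySem.List.enumerate ns 0).map (fun p => kf p.2) = ns.map kf := by
    conv_rhs => rw [← PySem.List.map_snd_enumerate ns 0]
    rw [List.map_map]
    rfl
  -- keys of both dicts: the distinct keys in first-occurrence order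
  have hkA : dA.keys = PySem.Set.ofList (ns.map kf) := by
    have := PySem.Dict.keys_foldl_modify_key (PySem.List.enumerate ns 0)
      (fun p => kf p.2) [] (fun _ p v => v ++ [p.1]) PySem.Dict.empty
    rw [hdA]
    refine Eq.trans this ?_
    rw [hmap, PySem.Dict.keys_empty, PySem.Set.ofList_eq_foldl]
    rfl
  have hkB : dB.keys = PySem.Set.ofList (ns.map kf) := by
    have := PySem.Dict.keys_foldl_insert_key (ns.map kf) (fun k => k)
      (fun _ k => vB k) PySem.Dict.empty
    rw [hdB]
    refine Eq.trans this ?_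
    rw [List.map_id', PySem.Dict.keys_empty, PySem.Set.ofList_eq_foldl]
    rfl
  have hndA : dA.keys.Nodup := by
    rw [hdA]
    exact PySem.Dict.nodup_keys_foldl_modify_key (PySem.List.enumerate ns 0)
      (fun p => kf p.2) [] (fun _ p v => v ++ [p.1]) PySem.Dict.empty
      PySem.Dict.nodup_keys_empty
  have hndB : dB.keys.Nodup := by
    rw [hdB]
    exact PySem.Dict.nodup_keys_foldl_insert_key (ns.map kf) (fun k => k)
      (fun _ k => vB k) PySem.Dict.empty PySem.Dict.nodup_keys_empty
  rw [PySem.Dict.items_eq_map_keys dA hndA [], PySem.Dict.items_eq_map_keys dB hndB [],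
    hkA, hkB]
  apply List.map_congr_left
  intro k hk
  have hkmem : k ∈ ns.map kf := (PySem.Set.mem_ofList (ns.map kf) k).mp hk
  -- A's value at k
  have hvA : dA.getD k [] = vB k := by
    have hfold : dA = ((PySem.List.enumerate ns 0).map (fun p => ((kf p.2 : String), p.1))).foldl
        (fun d q => d.modify q.1 [] (fun v => v ++ [q.2])) PySem.Dict.empty := by
      rw [hdA, List.foldl_map]
    rw [hfold, PySem.Dict.getD_foldl_modify_append]
    simp only [PySem.Dict.getD_empty, List.nil_append, hvB]
    exact idx_lists_eq kf k ns 0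
  -- B's value at k
  have hvBk : dB.getD k [] = vB k := by
    rw [hdB, PySem.Dict.getD_eq_get?_getD, get?_foldl_insert_const]
    simp [hkmem]
  rw [hvA, hvBk]

-- ===== VERDICT (by name: the statement is the Claim_ definition above) =====
theorem check_repeating_spec : Claim_equal_check_repeating := by
  intro numbers num_bytes _
  show _ = _
  simp only [check_repeating, check_repeating_alt]
  exact items_eq (fun num => PySem.Str.slice num (some ((-2) * num_bytes)) none) numbers
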